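-- pv_equiv track=rewrite | github.com/Bazulenkov/algorithms | Sprint16_Hash/e.py | continuous_segment
-- ===== SOURCE A (Python) =====
-- def continuous_segment(arr):
--     c1 = 0
--     c0 = 0
--     result = 0
--     for i in range(len(arr)):
--         if arr[i] == 0:
--             c0 += 1
--         else:
--             c1 += 1
--         if c0 == c1:
--             result += 2 * c0
--             c0 = c1 = 0
--     return result
-- ===== SOURCE B (Python) =====
-- def continuous_segment(arr):
--     # Stage 1: table of prefix balances (+1 for nonzero, -1 for zero).
--     pref = [0]
--     bal = 0
--     for x in arr:
--         bal += 1 if x != 0 else -1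
--         pref.append(bal)
--     # Stage 2: scan back-to-front for the rightmost zero balance; its index
--     # is the total length of the greedy balanced segments.
--     for j in range(len(arr), 0, -1):
--         if pref[j] == 0:
--             return j
--     return 0
-- ===== Notes on version B (the rewrite author's own statement) =====
-- stated objective: alternative
-- what changed: Two staged passes instead of A's single-pass counter bookkeeping: first build the full table of prefix balances, then search it back-to-front with early exit for the rightmost zero balance, whose index is the answer.
import Mathlib
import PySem

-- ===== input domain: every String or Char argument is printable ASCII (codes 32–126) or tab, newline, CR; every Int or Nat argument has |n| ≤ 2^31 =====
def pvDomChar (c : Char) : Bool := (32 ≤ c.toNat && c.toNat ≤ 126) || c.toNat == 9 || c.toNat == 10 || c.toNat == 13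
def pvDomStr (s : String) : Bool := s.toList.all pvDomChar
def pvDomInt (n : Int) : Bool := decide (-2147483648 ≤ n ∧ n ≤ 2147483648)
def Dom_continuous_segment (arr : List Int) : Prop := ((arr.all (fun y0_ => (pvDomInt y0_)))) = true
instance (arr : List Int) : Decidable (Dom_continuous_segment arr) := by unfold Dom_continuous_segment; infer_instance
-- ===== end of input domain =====

-- B replaces A's single-pass counter bookkeeping by two staged passes: build the table of
-- prefix balances, then search it back-to-front for the rightmost zero (same cost; return value only).

-- ===== PORT A =====
-- state (c1, c0, result); the loop over range(len(arr)) reading arr[i] is a fold over the elements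
def stepA_continuous_segment (st : Int × Int × Int) (x : Int) : Int × Int × Int :=
  let c1 := st.1
  let c0 := st.2.1
  let result := st.2.2
  let p := if x = 0 then (c1, c0 + 1) else (c1 + 1, c0)
  if p.2 = p.1 then (0, 0, result + 2 * p.2) else (p.1, p.2, result)

def continuous_segment (arr : List Int) : Int :=
  (arr.foldl stepA_continuous_segment (0, 0, 0)).2.2

-- ===== PORT B =====
-- stage 1 of Source B: pref = [0]; for x in arr: bal += ±1; pref.append(bal)
def buildPref_continuous_segment (arr : List Int) : List Int :=
  (arr.foldl (fun st x =>
      let bal := st.2 + (if x ≠ 0 then 1 else -1)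
      (st.1 ++ [bal], bal)) ([0], 0)).1

-- stage 2 of Source B: for j in range(len(arr), 0, -1): if pref[j] == 0: return j / return 0
def continuous_segment_alt (arr : List Int) : Int :=
  let pref := buildPref_continuous_segment arr
  match (PySem.List.pyRange (arr.length : Int) 0 (-1)).find?
         (fun j => PySem.List.pyGetD pref j 0 == 0) with
  | some j => j
  | none => 0

-- ===== PRECONDITION & SPEC =====
def Spec_continuous_segment (arr : List Int) (out : Int) : Prop := out = continuous_segment_alt arr
instance (arr : List Int) (out : Int) : Decidable (Spec_continuous_segment arr out) := by unfold Spec_continuous_segment; infer_instance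

-- ===== CLAIM (what is proved, stated in full; the proofs are below) =====
def Claim_equal_continuous_segment : Prop := ∀ (arr : List Int), Dom_continuous_segment arr → Spec_continuous_segment arr (continuous_segment arr)

-- ===== LEMMAS AND PROOFS =====

-- mathematical prefix-balance list: pvBalList arr b = balances after each element, starting from b
def pvDelta (x : Int) : Int := if x ≠ 0 then 1 else -1

def pvBalList : List Int → Int → List Int
  | [], _ => []
  | x :: t, b => (b + pvDelta x) :: pvBalList t (b + pvDelta x)

theorem pvBalList_length : ∀ (arr : List Int) (b : Int), (pvBalList arr b).length = arr.length := by
  intro arr; induction arr with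
  | nil => intro b; rfl
  | cons x t ih => intro b; simp [pvBalList, ih]

theorem pvBalList_append_singleton : ∀ (arr : List Int) (b x : Int),
    pvBalList (arr ++ [x]) b = pvBalList arr b ++ [b + (arr.map pvDelta).sum + pvDelta x] := by
  intro arr; induction arr with
  | nil => intro b x; simp [pvBalList]
  | cons y t ih =>
    intro b x
    simp only [List.cons_append, pvBalList, ih, List.map_cons, List.sum_cons]
    have : b + pvDelta y + (t.map pvDelta).sum + pvDelta x
        = b + (pvDelta y + (t.map pvDelta).sum) + pvDelta x := by ring
    rw [this]

theorem buildPref_fold : ∀ (arr : List Int) (acc : List Int) (b : Int),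
    (arr.foldl (fun st x =>
      let bal := st.2 + (if x ≠ 0 then 1 else -1)
      (st.1 ++ [bal], bal)) (acc, b)) = (acc ++ pvBalList arr b, b + (arr.map pvDelta).sum) := by
  intro arr; induction arr with
  | nil => intro acc b; simp [pvBalList]
  | cons x t ih =>
    intro acc b
    rw [List.foldl_cons]
    have hstep : (let bal := ((acc, b) : List Int × Int).2 + (if x ≠ 0 then (1:Int) else -1);
        ((((acc, b).1 ++ [bal], bal)) : List Int × Int)) = (acc ++ [b + pvDelta x], b + pvDelta x) := rfl
    rw [hstep, ih, Prod.mk.injEq]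
    constructor
    · simp [pvBalList, List.append_assoc]
    · simp only [List.map_cons, List.sum_cons]; ring

theorem buildPref_eq (arr : List Int) :
    buildPref_continuous_segment arr = 0 :: pvBalList arr 0 := by
  unfold buildPref_continuous_segment
  rw [buildPref_fold]
  rfl

theorem find?_congr_mem {α : Type} (l : List α) (p q : α → Bool)
    (h : ∀ a ∈ l, p a = q a) : l.find? p = l.find? q := by
  induction l with
  | nil => rfl
  | cons a t ih =>
    simp only [List.find?]
    rw [h a (by simp)]
    cases hq : q a with
    | true => rfl
    | false => exact ih (fun b hb => h b (by simp [hb]))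

-- pref[j] for 0 ≤ j < len is unchanged by appending an element on the right
theorem pyGetD_append_lt (l : List Int) (v j d : Int) (h0 : 0 ≤ j) (h1 : j < l.length) :
    PySem.List.pyGetD (l ++ [v]) j d = PySem.List.pyGetD l j d := by
  rw [PySem.List.pyGetD_eq_getElem _ _ h0 (by simp; omega),
      PySem.List.pyGetD_eq_getElem _ _ h0 (by exact_mod_cast h1)]
  rw [List.getElem_append_left (by omega)]

theorem pyGetD_append_last (l : List Int) (v d : Int) :
    PySem.List.pyGetD (l ++ [v]) (l.length : Int) d = v := by
  rw [PySem.List.pyGetD_eq_getElem _ _ (by positivity) (by simp)]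
  simp

-- main invariant: A's fold state vs B's staged result
theorem invA (arr : List Int) :
    ((arr.foldl stepA_continuous_segment (0,0,0)).2.2
      + (arr.foldl stepA_continuous_segment (0,0,0)).2.1
      + (arr.foldl stepA_continuous_segment (0,0,0)).1 = arr.length)
    ∧ ((arr.foldl stepA_continuous_segment (0,0,0)).1
        - (arr.foldl stepA_continuous_segment (0,0,0)).2.1 = (arr.map pvDelta).sum)
    ∧ (arr.foldl stepA_continuous_segment (0,0,0)).2.2 = continuous_segment_alt arr := by
  induction arr using List.reverseRecOn with
  | nil =>
    refine ⟨rfl, rfl, ?_⟩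
    simp [continuous_segment_alt, PySem.List.pyRange_neg_one_eq_nil (by omega : (0:Int) ≤ 0)]
  | append_singleton t x ih =>
    obtain ⟨h1, h2, h3⟩ := ih
    set st := t.foldl stepA_continuous_segment (0,0,0) with hst
    have hfold : (t ++ [x]).foldl stepA_continuous_segment (0,0,0) =
        stepA_continuous_segment st x := by
      rw [List.foldl_append]; rfl
    -- B side: new pref and new range
    have hprefT := buildPref_eq t
    have hprefTX := buildPref_eq (t ++ [x])
    have hbl : pvBalList (t ++ [x]) 0 = pvBalList t 0 ++ [0 + (t.map pvDelta).sum + pvDelta x] :=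
      pvBalList_append_singleton t 0 x
    have hlenT : ((0 : Int) :: pvBalList t 0).length = t.length + 1 := by
      simp [pvBalList_length]
    have hrange : PySem.List.pyRange ((t ++ [x]).length : Int) 0 (-1) =
        ((t.length : Int) + 1) :: PySem.List.pyRange (t.length : Int) 0 (-1) := by
      have := PySem.List.pyRange_neg_one_cons (a := (t.length : Int) + 1) (b := 0) (by positivity)
      simp only [List.length_append, List.length_singleton] at *
      push_cast
      simpa using this
    have hnewtop : PySem.List.pyGetD (buildPref_continuous_segment (t ++ [x]))
        ((t.length : Int) + 1) 0 = (t.map pvDelta).sum + pvDelta x := by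
      rw [hprefTX, hbl, ← List.cons_append]
      have : ((t.length : Int) + 1) = ((((0:Int) :: pvBalList t 0).length : Int)) := by
        rw [hlenT]; push_cast; ring
      rw [this, pyGetD_append_last]
      ring
    have hold : ∀ j ∈ PySem.List.pyRange (t.length : Int) 0 (-1),
        (PySem.List.pyGetD (buildPref_continuous_segment (t ++ [x])) j 0 == 0)
          = (PySem.List.pyGetD (buildPref_continuous_segment t) j 0 == 0) := by
      intro j hj
      rw [PySem.List.mem_pyRange_neg_one] at hj
      rw [hprefTX, hbl, ← List.cons_append, pyGetD_append_lt _ _ _ _ (by omega)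
            (by rw [hlenT]; push_cast; omega), hprefT]
    -- case split on whether the new balance is zero
    by_cases hz : (t.map pvDelta).sum + pvDelta x = 0
    · -- A resets; B finds t.length+1 at the head of the range
      have hA : stepA_continuous_segment st x = (0, 0, st.2.2 + 2 * (st.2.1 + (if x = 0 then 1 else 0))) := by
        by_cases hx : x = 0
        · have hc : st.2.1 + 1 = st.1 := by
            simp only [pvDelta, hx] at hz; simp at hz; omega
          simp [stepA_continuous_segment, hx, hc]
        · have hc : st.2.1 = st.1 + 1 := by
            simp only [pvDelta, if_pos hx] at hz; omega
          simp [stepA_continuous_segment, hx, hc]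
      have hBfind : continuous_segment_alt (t ++ [x]) = (t.length : Int) + 1 := by
        unfold continuous_segment_alt
        rw [hrange]
        simp only [List.find?]
        rw [show (PySem.List.pyGetD (buildPref_continuous_segment (t ++ [x])) ((t.length:Int)+1) 0 == 0)
              = true by rw [hnewtop]; simp [hz]]
      rw [hfold, hA, hBfind]
      have hdx : pvDelta x = (if x = 0 then -1 else 1) := by
        unfold pvDelta; by_cases hx : x = 0 <;> simp [hx]
      refine ⟨?_, ?_, ?_⟩ <;> simp only [List.length_append, List.length_singleton] <;> push_cast
      · by_cases hx : x = 0 <;> simp only [hx, if_true, if_false] <;> omega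
      · simp; omega
      · by_cases hx : x = 0 <;> simp only [hx, if_true, if_false] <;>
          [skip; skip] <;> rw [hdx] at hz <;> simp [hx] at hz <;> omega
    · -- A keeps counting; B skips the head and finds the same j as on t
      have hA : (stepA_continuous_segment st x).2.2 = st.2.2 ∧
          (stepA_continuous_segment st x).1 + (stepA_continuous_segment st x).2.1 = st.1 + st.2.1 + 1 ∧
          (stepA_continuous_segment st x).1 - (stepA_continuous_segment st x).2.1 = st.1 - st.2.1 + pvDelta x := by
        by_cases hx : x = 0
        · have hc : ¬ st.2.1 + 1 = st.1 := by
            simp only [pvDelta, hx] at hz; simp at hz; omega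
          simp only [stepA_continuous_segment, hx, if_pos, if_neg hc, pvDelta]
          refine ⟨trivial, by omega, by simp; omega⟩
        · have hc : ¬ st.2.1 = st.1 + 1 := by
            simp only [pvDelta, if_pos hx] at hz; omega
          simp only [stepA_continuous_segment, if_neg hx, if_neg hc, pvDelta]
          refine ⟨trivial, by omega, by simp [hx]; omega⟩
      have hBfind : continuous_segment_alt (t ++ [x]) = continuous_segment_alt t := by
        unfold continuous_segment_alt
        rw [hrange]
        simp only [List.find?]
        rw [show (PySem.List.pyGetD (buildPref_continuous_segment (t ++ [x])) ((t.length:Int)+1) 0 == 0)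
              = false by rw [hnewtop]; simp [hz]]
        rw [find?_congr_mem _ _ _ hold]
      rw [hfold, hBfind]
      obtain ⟨ha1, ha2, ha3⟩ := hA
      refine ⟨?_, ?_, ?_⟩
      · simp only [List.length_append, List.length_singleton]; push_cast; omega
      · simp only [List.map_append, List.sum_append, List.map_cons, List.map_nil,
          List.sum_cons, List.sum_nil]
        omega
      · rw [ha1, h3]

-- ===== VERDICT (by name: the statement is the Claim_ definition above) =====
theorem continuous_segment_spec : Claim_equal_continuous_segment := by
  intro arr _
  exact (invA arr).2.2
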